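-- pv_equiv track=rewrite | github.com/alex-abrehforoush/Homework | 8th sem/Compiler/2/P/1.py | leftFactoring
-- ===== SOURCE A (Python) =====
-- import itertools
--
-- def longestCommonPrefix(a):
--     size = len(a)
--     if (size == 0):
--         return ""
--     if (size == 1):
--         return a[0]
--     a.sort()
--     end = min(len(a[0]), len(a[size - 1]))
--     i = 0
--     while (i < end and
--            a[0][i] == a[size - 1][i]):
--         i += 1
--     pre = a[0][0: i]
--     return pre
--
-- def getLongestPrefixMatch(allrhs):
--     prefixes_len = dict()
--     prefixes = dict()
--     for L in range(2, len(allrhs) + 1):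
--         for subset in itertools.combinations(allrhs, L):
--             prefixes_len[subset] = len(longestCommonPrefix(list(subset)))
--             prefixes[subset] = longestCommonPrefix(list(subset))
--     if prefixes == {}:
--         return
--     return max(prefixes_len, key=prefixes_len.get), prefixes[max(prefixes_len, key=prefixes_len.get)]
--
-- def leftFactoring(input_grammar):
--     output_grammar = {}
--     for lhs in input_grammar.keys():
--         if len(input_grammar[lhs]) > 1:
--             allrhs = input_grammar[lhs]
--             longest_matching_prefix_rhs, longest_matching_prefix = getLongestPrefixMatch(allrhs)
--             if (longest_matching_prefix != ''):
--                 new_lhs = lhs + "'"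
--                 while (new_lhs in output_grammar.keys() or new_lhs in input_grammar.keys()):
--                     new_lhs += "'"
--                 new_rhs = []
--                 p_new_rhs = []
--                 length_of_common_prefix = len(longest_matching_prefix)
--                 for rhs in longest_matching_prefix_rhs:
--                     p_new_rhs.append(rhs[length_of_common_prefix:])
--                 for rhs in allrhs:
--                     if (rhs not in longest_matching_prefix_rhs):
--                         new_rhs.append(rhs)
--                 new_rhs.append(longest_matching_prefix + new_lhs)
--                 output_grammar[lhs] = new_rhs
--                 output_grammar[new_lhs] = p_new_rhs
--                 continue
--         output_grammar[lhs] = input_grammar[lhs]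
--     return output_grammar
-- ===== SOURCE B (Python) =====
-- def leftFactoring(input_grammar):
--     # One pass over all pairs of alternatives per nonterminal: the longest common
--     # prefix over any set of >=2 alternatives is attained by a pair, and A's
--     # subset enumeration (pairs first, in index-lexicographic order, first
--     # maximum kept) selects exactly the first pair with maximal prefix length.
--     output_grammar = {}
--     for lhs, allrhs in input_grammar.items():
--         best_len, best = 0, None
--         rest = allrhs
--         while rest:
--             x, rest = rest[0], rest[1:]
--             for y in rest:
--                 l = 0
--                 while l < len(x) and l < len(y) and x[l] == y[l]:
--                     l += 1
--                 if l > best_len: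
--                     best_len, best = l, (x, y)
--         if best is None:
--             output_grammar[lhs] = allrhs
--         else:
--             x, y = best
--             new_lhs = lhs + "'"
--             while new_lhs in output_grammar or new_lhs in input_grammar:
--                 new_lhs += "'"
--             output_grammar[lhs] = [r for r in allrhs if r != x and r != y] + [x[:best_len] + new_lhs]
--             output_grammar[new_lhs] = [x[best_len:], y[best_len:]]
--     return output_grammar
-- ===== Notes on version B (the rewrite author's own statement) =====
-- stated objective: faster
-- what changed: A enumerates all 2^n subsets of each nonterminal's alternatives and takes the dict-order first maximum of their longest common prefixes; B scans only the O(n^2) ordered pairs keeping the first pair with strictly maximal common-prefix length, which provably selects the same subset because the maximum is always attained at the first pair.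
import Mathlib
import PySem

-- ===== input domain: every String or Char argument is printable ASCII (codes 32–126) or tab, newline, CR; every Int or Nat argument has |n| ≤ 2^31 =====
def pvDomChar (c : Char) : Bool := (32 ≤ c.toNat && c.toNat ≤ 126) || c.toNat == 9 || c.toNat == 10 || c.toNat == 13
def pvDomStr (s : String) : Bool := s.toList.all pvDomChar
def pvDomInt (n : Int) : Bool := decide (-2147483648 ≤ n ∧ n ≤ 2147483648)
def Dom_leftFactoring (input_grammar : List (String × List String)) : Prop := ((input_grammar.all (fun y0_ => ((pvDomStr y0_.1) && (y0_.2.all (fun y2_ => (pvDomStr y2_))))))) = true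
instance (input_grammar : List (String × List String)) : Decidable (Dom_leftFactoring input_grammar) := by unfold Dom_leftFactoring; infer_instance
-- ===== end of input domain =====

-- B replaces A's exponential enumeration of all subsets of alternatives by a quadratic
-- scan over ordered pairs keeping the first pair with strictly maximal common-prefix
-- length; objective: faster (asymptotic).

-- ===== PORT A =====

-- the `while (i < end and a[0][i] == a[size-1][i]): i += 1` index loop of
-- longestCommonPrefix, as the obvious structural two-list scan (it stops exactly at
-- the first mismatch or at min(len, len), i.e. when either list runs out)
def lcpLen : List Char → List Char → Nat
  | a :: as, b :: bs => if a = b then lcpLen as bs + 1 else 0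
  | _, _ => 0

def longestCommonPrefixA (a : List String) : String :=
  if a.length = 0 then ""
  else if a.length = 1 then PySem.List.pyGetD a 0 ""
  else
    let s := PySem.List.sorted a (fun x => x) false
    let x := PySem.List.pyGetD s 0 ""                       -- a[0] (size ≥ 2, in range)
    let y := PySem.List.pyGetD s ((a.length : Int) - 1) ""  -- a[size-1]
    String.ofList (PySem.List.slice x.toList (some 0) (some ((lcpLen x.toList y.toList : Nat) : Int)))  -- a[0][0:i]

def getLongestPrefixMatchA (allrhs : List String) : Option (List String × String) :=
  let st := (PySem.List.pyRange 2 ((allrhs.length : Int) + 1) 1).foldl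
    (fun (st : PySem.Dict (List String) Int × PySem.Dict (List String) String) L =>
      (PySem.List.combinations allrhs L.toNat).foldl
        (fun st subset =>
          (st.1.insert subset (PySem.Str.len (longestCommonPrefixA subset)),
           st.2.insert subset (longestCommonPrefixA subset))) st)
    (PySem.Dict.empty, PySem.Dict.empty)
  if st.2.items.isEmpty then none
  else
    match PySem.List.max? st.1.keys (fun k => st.1.getD k 0) with
    | some k => some (k, st.2.getD k "")
    | none => none  -- unreachable: st.1 has the same (nonempty) keys as st.2

-- the `while new_lhs in … : new_lhs += "'"` loop of both programs; the fuel
-- (#output keys + #input keys + 1) strictly exceeds the number of names the test can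
-- accept, so the guard never exhausts on the loop Python runs
def freshTick (pred : String → Bool) : Nat → String → String
  | 0, s => s
  | n + 1, s => if pred s then freshTick pred n (s ++ "'") else s

def leftFactoring (input_grammar : List (String × List String)) : List (String × List String) :=
  let input : PySem.Dict String (List String) := ⟨input_grammar⟩
  let out := input.keys.foldl
    (fun (out : PySem.Dict String (List String)) lhs =>
      let allrhs := input.getD lhs []
      if 1 < allrhs.length then
        match getLongestPrefixMatchA allrhs with
        | some (sub, pre) =>
          if pre ≠ "" then
            let newLhs := freshTick
              (fun s => out.keys.contains s || input.keys.contains s)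
              (out.size + input.size + 1) (lhs ++ "'")
            let pNewRhs := sub.map (fun rhs =>
              String.ofList (PySem.List.slice rhs.toList (some (PySem.Str.len pre)) none))
            let newRhs := allrhs.foldl (fun acc rhs => if rhs ∉ sub then acc ++ [rhs] else acc) []
            (out.insert lhs (newRhs ++ [pre ++ newLhs])).insert newLhs pNewRhs
          else out.insert lhs allrhs
        | none => out.insert lhs allrhs  -- unreachable: len(allrhs) > 1 yields a match
      else out.insert lhs allrhs)
    PySem.Dict.empty
  out.items

-- ===== PORT B =====

-- `while rest: x, rest = rest[0], rest[1:]; for y in rest: …` of Source B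
def bestLoop : Nat × Option (String × String) → List String → Nat × Option (String × String)
  | st, [] => st
  | st, x :: rest =>
    bestLoop
      (rest.foldl (fun st y =>
        let l := lcpLen x.toList y.toList
        if st.1 < l then (l, some (x, y)) else st) st) rest

def leftFactoring_alt (input_grammar : List (String × List String)) : List (String × List String) :=
  input_grammar.foldl
    (fun (out : List (String × List String)) p =>
      let lhs := p.1
      let allrhs := p.2
      let st := bestLoop (0, none) allrhs
      match st.2 with
      | none => out ++ [(lhs, allrhs)]
      | some (x, y) =>
        let newLhs := freshTick
          (fun s => (out.map Prod.fst).contains s || (input_grammar.map Prod.fst).contains s)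
          (out.length + input_grammar.length + 1) (lhs ++ "'")
        out ++ [(lhs, allrhs.filter (fun r => !(r == x) && !(r == y)) ++
                  [String.ofList (PySem.List.slice x.toList none (some (st.1 : Int))) ++ newLhs]),
                (newLhs, [String.ofList (PySem.List.slice x.toList (some (st.1 : Int)) none),
                          String.ofList (PySem.List.slice y.toList (some (st.1 : Int)) none)])])
    []

-- ===== PRECONDITION & SPEC =====
-- Pre_ excludes association lists with duplicate keys: the parameter is a Python dict,
-- which cannot carry duplicate keys, so such lists represent no actual input of A.
def Pre_leftFactoring (input_grammar : List (String × List String)) : Prop :=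
  (input_grammar.map Prod.fst).Nodup
instance (input_grammar : List (String × List String)) : Decidable (Pre_leftFactoring input_grammar) := by
  unfold Pre_leftFactoring; infer_instance

def pvWitness_leftFactoring : (List (String × List String)) :=
  [("S", ["ab", "ac", "d"]), ("T", ["x"])]

def Spec_leftFactoring (input_grammar : List (String × List String)) (out : List (String × List String)) : Prop := out = leftFactoring_alt input_grammar
instance (input_grammar : List (String × List String)) (out : List (String × List String)) : Decidable (Spec_leftFactoring input_grammar out) := by unfold Spec_leftFactoring; infer_instance

-- ===== CLAIM (what is proved, stated in full; the proofs are below) =====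
def Claim_equal_leftFactoring : Prop := ∀ (input_grammar : List (String × List String)), Dom_leftFactoring input_grammar → Pre_leftFactoring input_grammar → Spec_leftFactoring input_grammar (leftFactoring input_grammar)

-- ===== LEMMAS AND PROOFS =====

-- ---------- lcpLen basics ----------

lemma lcpLen_le_left (u v : List Char) : lcpLen u v ≤ u.length := by
  induction u generalizing v with
  | nil => simp [lcpLen]
  | cons a u ih =>
    cases v with
    | nil => simp [lcpLen]
    | cons b v =>
      simp only [lcpLen]
      split
      · simpa using ih v
      · simp

lemma lcpLen_le_right (u v : List Char) : lcpLen u v ≤ v.length := by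
  induction u generalizing v with
  | nil => simp [lcpLen]
  | cons a u ih =>
    cases v with
    | nil => simp [lcpLen]
    | cons b v =>
      simp only [lcpLen]
      split
      · simpa using ih v
      · simp

lemma lcpLen_comm (u v : List Char) : lcpLen u v = lcpLen v u := by
  induction u generalizing v with
  | nil => cases v <;> simp [lcpLen]
  | cons a u ih =>
    cases v with
    | nil => simp [lcpLen]
    | cons b v =>
      simp only [lcpLen]
      rcases eq_or_ne a b with h | h
      · subst h; simp [ih]
      · simp [h, Ne.symm h]

lemma take_lcpLen_eq (u v : List Char) : u.take (lcpLen u v) = v.take (lcpLen u v) := by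
  induction u generalizing v with
  | nil => simp [lcpLen]
  | cons a u ih =>
    cases v with
    | nil => simp [lcpLen]
    | cons b v =>
      simp only [lcpLen]
      rcases eq_or_ne a b with h | h
      · subst h; simp [ih]
      · simp [h]

lemma le_lcpLen_of_take_eq (u v : List Char) (k : Nat) (hk : k ≤ u.length)
    (h : u.take k = v.take k) : k ≤ lcpLen u v := by
  induction u generalizing v k with
  | nil =>
    have : k = 0 := by simpa using hk
    omega
  | cons a u ih =>
    cases k with
    | zero => simp
    | succ k =>
      cases v with
      | nil => simp at h
      | cons b v =>
        simp only [List.take_succ_cons, List.cons.injEq] at h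
        obtain ⟨rfl, h2⟩ := h
        have h3 : lcpLen (a :: u) (a :: v) = lcpLen u v + 1 := by simp [lcpLen]
        have := ih v k (by simpa using hk) h2
        omega

-- ---------- lexicographic order facts ----------

lemma cons_le_head {a b : Char} {u v : List Char} (h : (a :: u : List Char) ≤ b :: v) : a ≤ b := by
  rcases h.lt_or_eq with h | h
  · rw [List.cons_lt_cons_iff] at h
    rcases h with h | ⟨h, _⟩
    · exact le_of_lt h
    · exact le_of_eq h
  · simp_all

lemma cons_le_tail {a : Char} {u v : List Char} (h : (a :: u : List Char) ≤ a :: v) : u ≤ v := by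
  rcases h.lt_or_eq with h | h
  · rw [List.cons_lt_cons_iff] at h
    rcases h with h | ⟨_, h2⟩
    · exact absurd h (lt_irrefl a)
    · exact le_of_lt h2
  · simp_all

lemma lcpLen_between (u t v : List Char) (h1 : u ≤ t) (h2 : t ≤ v) :
    lcpLen u v ≤ lcpLen u t := by
  induction u generalizing t v with
  | nil => simp [lcpLen]
  | cons a u ih =>
    cases v with
    | nil => simp [lcpLen]
    | cons b v =>
      rcases eq_or_ne a b with rfl | hne
      · cases t with
        | nil => exact absurd h1 (of_decide_eq_false rfl)
        | cons c t =>
          have hac : a ≤ c := cons_le_head h1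
          have hca : c ≤ a := cons_le_head h2
          have : a = c := le_antisymm hac hca
          subst this
          have hut : u ≤ t := cons_le_tail h1
          have htv : t ≤ v := cons_le_tail h2
          have e1 : lcpLen (a :: u) (a :: v) = lcpLen u v + 1 := by simp [lcpLen]
          have e2 : lcpLen (a :: u) (a :: t) = lcpLen u t + 1 := by simp [lcpLen]
          rw [e1, e2]
          exact Nat.succ_le_succ (ih t v hut htv)
      · simp [lcpLen, hne]

lemma pairwise_le_getLast {l : List String} (hp : l.Pairwise (· ≤ ·)) (h : l ≠ []) :
    ∀ x ∈ l, x ≤ l.getLast h := by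
  induction l with
  | nil => simp at h
  | cons a l ih =>
    intro x hx
    rcases List.mem_cons.mp hx with rfl | hx
    · cases l with
      | nil => simp
      | cons b t =>
        rw [List.getLast_cons (by simp)]
        have hab : x ≤ b := (List.pairwise_cons.mp hp).1 b (by simp)
        have hp' := (List.pairwise_cons.mp hp).2
        exact le_trans hab (ih hp' (by simp) b (by simp))
    · have hl : l ≠ [] := by rintro rfl; simp at hx
      rw [List.getLast_cons hl]
      exact ih (List.pairwise_cons.mp hp).2 hl x hx

-- ---------- longestCommonPrefixA on concrete shapes ----------

lemma sorted_pair (x y : String) :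
    PySem.List.sorted [x, y] (fun s => s) false = if x ≤ y then [x, y] else [y, x] := by
  by_cases h : x ≤ y
  · rw [if_pos h]
    apply PySem.List.sorted_eq_self_of_pairwise
    refine List.Pairwise.cons ?_ (by simp)
    intro b hb
    simp only [List.mem_singleton] at hb
    subst hb
    exact h
  · rw [if_neg h]
    apply PySem.List.sorted_eq_of_perm_of_pairwise_lt
    · exact List.Perm.swap x y []
    · simp [String.lt_iff_toList_lt.mp (lt_of_not_ge h)]

lemma lcpA_pair (x y : String) :
    longestCommonPrefixA [x, y] = String.ofList (x.toList.take (lcpLen x.toList y.toList)) := by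
  have e2 : ∀ u v : String, PySem.List.pyGetD [u, v] (1 : Int) "" = v := by
    intro u v
    rw [show (1 : Int) = ((1 : Nat) : Int) from rfl, PySem.List.pyGetD_natCast]
    rfl
  unfold longestCommonPrefixA
  rw [sorted_pair]
  by_cases h : x ≤ y
  · rw [if_pos h]
    norm_num
    rw [e2]
  · rw [if_neg h]
    norm_num
    rw [e2, take_lcpLen_eq, lcpLen_comm]

-- the common prefix of a sorted set of strings is a common prefix of ANY two of them
lemma lcpA_le_pair (s0 s1 : String) (t : List String) :
    (longestCommonPrefixA (s0 :: s1 :: t)).toList.length ≤ lcpLen s0.toList s1.toList := by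
  set S := s0 :: s1 :: t with hSdef
  obtain ⟨m, tl, hσ⟩ : ∃ m tl, PySem.List.sorted S (fun s => s) false = m :: tl := by
    cases hs : PySem.List.sorted S (fun s => s) false with
    | nil => exact absurd ((PySem.List.sorted_eq_nil_iff _ _ _).mp hs) (by simp [hSdef])
    | cons m tl => exact ⟨m, tl, rfl⟩
  have hlenσ : (PySem.List.sorted S (fun s => s) false).length = S.length :=
    PySem.List.length_sorted _ _ _
  have hne : (PySem.List.sorted S (fun s => s) false) ≠ [] := by rw [hσ]; simp
  set last := (PySem.List.sorted S (fun s => s) false).getLast hne with hlast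
  unfold longestCommonPrefixA
  have h0 : ¬ S.length = 0 := by simp [hSdef]
  have h1 : ¬ S.length = 1 := by simp [hSdef]
  rw [if_neg h0, if_neg h1]
  dsimp only
  have e1 : PySem.List.pyGetD (PySem.List.sorted S (fun s => s) false) (0 : Int) "" = m := by
    rw [hσ]; exact PySem.List.pyGetD_zero_cons _ _ _
  have e2 : PySem.List.pyGetD (PySem.List.sorted S (fun s => s) false)
      ((S.length : Int) - 1) "" = last := by
    have hl2 : 2 ≤ S.length := by simp [hSdef]
    have h9 : ((S.length : Int) - 1) = ((S.length - 1 : Nat) : Int) := by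
      push_cast [Nat.cast_sub (by omega : 1 ≤ S.length)]; ring
    have h10 : S.length - 1 = (PySem.List.sorted S (fun s => s) false).length - 1 := by
      rw [hlenσ]
    rw [h9, PySem.List.pyGetD_natCast, h10]
    have hpos : 0 < (PySem.List.sorted S (fun s => s) false).length := by rw [hσ]; simp
    rw [List.getD_eq_getElem?_getD, List.getElem?_eq_getElem (by omega), hlast,
      List.getLast_eq_getElem]
    simp
  rw [e1, e2, PySem.List.slice_zero_start, PySem.List.slice_to_natCast,
    String.toList_ofList]
  set k := lcpLen m.toList last.toList with hk
  have hkle : k ≤ m.toList.length := lcpLen_le_left _ _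
  have hlen : (m.toList.take k).length = k := by
    rw [List.length_take]; exact Nat.min_eq_left hkle
  rw [hlen]
  -- take k m is a common prefix of every element of S
  have hcommon : ∀ z ∈ S, z.toList.take k = m.toList.take k ∧ k ≤ z.toList.length := by
    intro z hz
    have hzσ : z ∈ PySem.List.sorted S (fun s => s) false :=
      (PySem.List.mem_sorted _ _ _ _).mpr hz
    have hmz : m ≤ z := PySem.List.key_head_sorted_le S (fun s => s) hσ z hz
    have hzl : z ≤ last := by
      apply pairwise_le_getLast _ hne z hzσ
      have := PySem.List.sorted_pairwise S (fun s => s)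
      simpa using this
    have h1' : m.toList ≤ z.toList := String.le_iff_toList_le.mp hmz
    have h2' : z.toList ≤ last.toList := String.le_iff_toList_le.mp hzl
    have hbet : k ≤ lcpLen m.toList z.toList := lcpLen_between _ _ _ h1' h2'
    have htk : m.toList.take k = z.toList.take k := by
      have := take_lcpLen_eq m.toList z.toList
      have h5 := congrArg (List.take k) this
      rwa [List.take_take, List.take_take, Nat.min_eq_left hbet] at h5
    exact ⟨htk.symm, le_trans hbet (lcpLen_le_right _ _)⟩
  have h0' := hcommon s0 (by simp [hSdef])
  have h1' := hcommon s1 (by simp [hSdef])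
  exact le_lcpLen_of_take_eq _ _ k h0'.2 (h0'.1.trans h1'.1.symm)

-- ---------- dict-building folds ----------

lemma getD_foldl_insert_fun {κ ν : Type} [BEq κ] [LawfulBEq κ] [DecidableEq κ]
    (l : List κ) (f : κ → ν) (d : PySem.Dict κ ν) (k : κ) (d0 : ν) :
    (l.foldl (fun d x => d.insert x (f x)) d).getD k d0
      = if k ∈ l then f k else d.getD k d0 := by
  induction l generalizing d with
  | nil => simp
  | cons x l ih =>
    simp only [List.foldl_cons, ih, PySem.Dict.getD_insert, List.mem_cons]
    by_cases h1 : k ∈ l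
    · simp [h1]
    · by_cases h2 : k = x <;> simp [h1, h2]

-- ---------- max? (Python max with key: FIRST maximum) ----------

def mstep {α κ : Type} [LinearOrder κ] (f : α → κ) (acc : Option α) (x : α) : Option α :=
  match acc with
  | none => some x
  | some m => if f m < f x then some x else some m

lemma max?_eq_foldl {α κ : Type} [LinearOrder κ] (l : List α) (f : α → κ) :
    PySem.List.max? l f = l.foldl (mstep f) none := rfl

lemma foldl_maxstep_of_le {α κ : Type} [LinearOrder κ] (f : α → κ) (l : List α) (a : α)
    (h : ∀ x ∈ l, f x ≤ f a) :
    l.foldl (mstep f) (some a) = some a := by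
  induction l with
  | nil => rfl
  | cons x l ih =>
    have hx : ¬ f a < f x := not_lt.mpr (h x (by simp))
    simp only [List.foldl_cons, mstep, if_neg hx]
    exact ih (fun y hy => h y (by simp [hy]))

lemma max?_of_decomp {α κ : Type} [LinearOrder κ] (f : α → κ) (pre suf : List α) (m : α)
    (h1 : ∀ x ∈ pre, f x < f m) (h2 : ∀ x ∈ suf, f x ≤ f m) :
    PySem.List.max? (pre ++ m :: suf) f = some m := by
  rw [max?_eq_foldl, List.foldl_append]
  by_cases hne : pre = []
  · subst hne
    simp only [List.foldl_nil, List.foldl_cons]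
    exact foldl_maxstep_of_le f suf m h2
  · obtain ⟨m0, hm0⟩ : ∃ m0, PySem.List.max? pre f = some m0 := by
      cases hmx : PySem.List.max? pre f with
      | none => exact absurd ((PySem.List.max?_eq_none_iff pre f).mp hmx) hne
      | some m0 => exact ⟨m0, rfl⟩
    have hmem : m0 ∈ pre := PySem.List.max?_mem hm0
    rw [max?_eq_foldl] at hm0
    rw [hm0]
    simp only [List.foldl_cons, mstep, if_pos (h1 m0 hmem)]
    exact foldl_maxstep_of_le f suf m h2

-- ---------- pairs, and B's scan ----------

def pairsOf : List String → List (String × String)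
  | [] => []
  | x :: t => t.map (fun y => (x, y)) ++ pairsOf t

def pv (p : String × String) : Nat := lcpLen p.1.toList p.2.toList

def bstep (st : Nat × Option (String × String)) (p : String × String) :
    Nat × Option (String × String) :=
  if st.1 < pv p then (pv p, some p) else st

lemma combos2_eq (rs : List String) :
    PySem.List.combinations rs 2 = (pairsOf rs).map (fun p => [p.1, p.2]) := by
  induction rs with
  | nil => rfl
  | cons x t ih =>
    rw [show (2 : Nat) = 1 + 1 from rfl, PySem.List.combinations_cons_succ,
      PySem.List.combinations_one]
    simp only [pairsOf, List.map_append, List.map_map, ih]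
    rfl

lemma bestLoop_eq_foldl (rs : List String) (st : Nat × Option (String × String)) :
    bestLoop st rs = (pairsOf rs).foldl bstep st := by
  induction rs generalizing st with
  | nil => rfl
  | cons x t ih =>
    simp only [bestLoop, pairsOf, List.foldl_append, List.foldl_map, ih]
    rfl

lemma mem_pairsOf_of_sublist {x y : String} {rs : List String}
    (h : ([x, y] : List String).Sublist rs) : (x, y) ∈ pairsOf rs := by
  have hmem : ([x, y] : List String) ∈ PySem.List.combinations rs 2 :=
    (PySem.List.mem_combinations_iff rs 2 [x, y]).mpr ⟨h, rfl⟩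
  rw [combos2_eq, List.mem_map] at hmem
  obtain ⟨q, hq, heq⟩ := hmem
  have : q = (x, y) := by
    cases q
    simp only [List.cons.injEq, and_true] at heq
    simp [heq.1, heq.2]
  exact this ▸ hq

lemma bfold_noup (l : List (String × String)) (st : Nat × Option (String × String))
    (h : ∀ p ∈ l, pv p ≤ st.1) : l.foldl bstep st = st := by
  induction l with
  | nil => rfl
  | cons p l ih =>
    have : ¬ st.1 < pv p := not_lt.mpr (h p (by simp))
    simp only [List.foldl_cons, bstep, if_neg this]
    exact ih (fun q hq => h q (by simp [hq]))

lemma bfold_fst_cases (l : List (String × String)) (st : Nat × Option (String × String)) :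
    (l.foldl bstep st).1 = st.1 ∨ ∃ p ∈ l, (l.foldl bstep st).1 = pv p := by
  induction l generalizing st with
  | nil => exact Or.inl rfl
  | cons p l ih =>
    simp only [List.foldl_cons, bstep]
    split
    · rcases ih (pv p, some p) with h | ⟨q, hq, h⟩
      · exact Or.inr ⟨p, by simp, h⟩
      · exact Or.inr ⟨q, by simp [hq], h⟩
    · rcases ih st with h | ⟨q, hq, h⟩
      · exact Or.inl h
      · exact Or.inr ⟨q, by simp [hq], h⟩

lemma bfold_decomp (pre suf : List (String × String)) (m : String × String)
    (h1 : ∀ x ∈ pre, pv x < pv m) (h2 : ∀ x ∈ suf, pv x ≤ pv m) (h3 : 1 ≤ pv m) :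
    (pre ++ m :: suf).foldl bstep (0, none) = (pv m, some m) := by
  rw [List.foldl_append]
  have hpre : ((pre.foldl bstep (0, none)).1) < pv m := by
    rcases bfold_fst_cases pre (0, none) with h | ⟨q, hq, h⟩
    · rw [h]; exact h3
    · rw [h]; exact h1 q hq
  simp only [List.foldl_cons, bstep, if_pos hpre]
  exact bfold_noup suf _ (by simpa using h2)

-- ---------- A's subset enumeration ----------

def allCombos (rs : List String) : List (List String) :=
  (PySem.List.pyRange 2 ((rs.length : Int) + 1) 1).flatMap
    (fun L => PySem.List.combinations rs L.toNat)

def glen (k : List String) : Int := PySem.Str.len (longestCommonPrefixA k)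

lemma allCombos_decomp (rs : List String) (h2 : 2 ≤ rs.length) :
    allCombos rs = PySem.List.combinations rs 2
      ++ (PySem.List.pyRange 3 ((rs.length : Int) + 1) 1).flatMap
           (fun L => PySem.List.combinations rs L.toNat) := by
  unfold allCombos
  rw [PySem.List.pyRange_one_append 2 3 ((rs.length : Int) + 1) (by omega)
    (by exact_mod_cast by omega), List.flatMap_append,
    show (3 : Int) = 2 + 1 from rfl, PySem.List.pyRange_one_singleton]
  simp

lemma mem_allCombos_pair {rs : List String} (h2 : 2 ≤ rs.length) :
    ∃ c, c ∈ allCombos rs := by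
  match rs, h2 with
  | r0 :: r1 :: t, _ =>
    refine ⟨[r0, r1], List.mem_flatMap.mpr ⟨2, ?_, ?_⟩⟩
    · rw [PySem.List.mem_pyRange_one]
      constructor
      · omega
      · have : (2 : Int) ≤ ((r0 :: r1 :: t).length : Int) := by
          simp; omega
        omega
    · show [r0, r1] ∈ PySem.List.combinations (r0 :: r1 :: t) 2
      exact (PySem.List.mem_combinations_iff _ _ _).mpr
        ⟨(List.nil_sublist t).cons₂ r1 |>.cons₂ r0, rfl⟩

-- every subset A enumerates beyond the pairs has a pair bounding its value
lemma sub_pair_bound (rs : List String) {S : List String}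
    (hsub : S.Sublist rs) (hlen : 2 ≤ S.length) :
    ∃ q ∈ pairsOf rs, glen S ≤ (pv q : Int) := by
  match S, hlen with
  | s0 :: s1 :: t, _ =>
    refine ⟨(s0, s1), ?_, ?_⟩
    · apply mem_pairsOf_of_sublist
      exact List.Sublist.trans ((List.nil_sublist t).cons₂ s1 |>.cons₂ s0) hsub
    · unfold glen
      rw [PySem.Str.len]
      exact_mod_cast lcpA_le_pair s0 s1 t

lemma rest_bounded (rs : List String) {S : List String}
    (hS : S ∈ (PySem.List.pyRange 3 ((rs.length : Int) + 1) 1).flatMap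
           (fun L => PySem.List.combinations rs L.toNat)) :
    ∃ q ∈ pairsOf rs, glen S ≤ (pv q : Int) := by
  obtain ⟨L, hL, hSc⟩ := List.mem_flatMap.mp hS
  rw [PySem.List.mem_pyRange_one] at hL
  obtain ⟨hsub, hlen⟩ := (PySem.List.mem_combinations_iff _ _ _).mp hSc
  apply sub_pair_bound rs hsub
  omega

lemma glen_wrap (p : String × String) : glen [p.1, p.2] = (pv p : Int) := by
  unfold glen
  rw [lcpA_pair]
  have h9 : (String.ofList (p.1.toList.take (lcpLen p.1.toList p.2.toList))).toList.length
      = pv p := by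
    rw [String.toList_ofList, List.length_take]
    exact Nat.min_eq_left (lcpLen_le_left _ _)
  rw [PySem.Str.len, h9]

lemma glen_nonneg (k : List String) : 0 ≤ glen k := by
  unfold glen
  simp [PySem.Str.len]

lemma foldl_maxstep_congr {α κ : Type} [LinearOrder κ] (f g : α → κ) :
    ∀ (l : List α), (∀ x ∈ l, f x = g x) →
    ∀ (acc : Option α), (∀ m, acc = some m → f m = g m) →
      l.foldl (mstep f) acc = l.foldl (mstep g) acc := by
  intro l
  induction l with
  | nil => intro _ acc _; rfl
  | cons x l ih =>
    intro h acc hacc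
    have hx : f x = g x := h x (by simp)
    have hstep : mstep f acc x = mstep g acc x := by
      cases acc with
      | none => rfl
      | some m => simp only [mstep, hacc m rfl, hx]
    have hinv : ∀ m', mstep f acc x = some m' → f m' = g m' := by
      intro m' hm'
      cases acc with
      | none =>
        simp only [mstep, Option.some.injEq] at hm'
        subst hm'; exact hx
      | some m =>
        simp only [mstep] at hm'
        by_cases hc : f m < f x
        · rw [if_pos hc, Option.some.injEq] at hm'
          subst hm'; exact hx
        · rw [if_neg hc, Option.some.injEq] at hm'
          subst hm'; exact hacc m rfl
    rw [List.foldl_cons, List.foldl_cons, ← hstep]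
    exact ih (fun z hz => h z (by simp [hz])) _ hinv

lemma max?_congr {α κ : Type} [LinearOrder κ] (l : List α) (f g : α → κ)
    (h : ∀ x ∈ l, f x = g x) : PySem.List.max? l f = PySem.List.max? l g := by
  rw [max?_eq_foldl, max?_eq_foldl]
  exact foldl_maxstep_congr f g l h none (by simp)

lemma mem_dedup' {α : Type} [BEq α] [LawfulBEq α] {x : α} {l : List α} :
    x ∈ PySem.List.dedup l ↔ x ∈ l := PySem.List.mem_dedup l x

lemma gLPM_eq (rhss : List String) (h2 : 2 ≤ rhss.length) :
    getLongestPrefixMatchA rhss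
      = (PySem.List.max? (PySem.List.dedup (allCombos rhss)) glen).map
          (fun k => (k, longestCommonPrefixA k)) := by
  unfold getLongestPrefixMatchA
  dsimp only
  rw [← List.foldl_flatMap, PySem.List.foldl_prod_mk
    (f := fun (d : PySem.Dict (List String) Int) subset =>
      d.insert subset (PySem.Str.len (longestCommonPrefixA subset)))
    (g := fun (d : PySem.Dict (List String) String) subset =>
      d.insert subset (longestCommonPrefixA subset))]
  set AC := (PySem.List.pyRange 2 ((rhss.length : Int) + 1) 1).flatMap
    (fun L => PySem.List.combinations rhss L.toNat) with hAC
  have hACall : AC = allCombos rhss := rfl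
  have hk1 : (AC.foldl (fun (d : PySem.Dict (List String) Int) subset =>
      d.insert subset (PySem.Str.len (longestCommonPrefixA subset))) PySem.Dict.empty).keys
      = PySem.List.dedup AC := by
    rw [PySem.Dict.keys_foldl_insert AC
      (fun _ subset => PySem.Str.len (longestCommonPrefixA subset)) PySem.Dict.empty]
    rfl
  have hk2 : (AC.foldl (fun (d : PySem.Dict (List String) String) subset =>
      d.insert subset (longestCommonPrefixA subset)) PySem.Dict.empty).keys
      = PySem.List.dedup AC := by
    rw [PySem.Dict.keys_foldl_insert AC
      (fun _ subset => longestCommonPrefixA subset) PySem.Dict.empty]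
    rfl
  obtain ⟨c0, hc0⟩ := mem_allCombos_pair h2
  have hcd : c0 ∈ PySem.List.dedup AC := mem_dedup'.mpr (hACall ▸ hc0)
  have hne2 : (AC.foldl (fun (d : PySem.Dict (List String) String) subset =>
      d.insert subset (longestCommonPrefixA subset)) PySem.Dict.empty).items ≠ [] := by
    intro hnil
    have : (AC.foldl (fun (d : PySem.Dict (List String) String) subset =>
        d.insert subset (longestCommonPrefixA subset)) PySem.Dict.empty).keys = [] := by
      show List.map _ _ = []
      rw [show (AC.foldl (fun (d : PySem.Dict (List String) String) subset =>
        d.insert subset (longestCommonPrefixA subset)) PySem.Dict.empty).items = [] from hnil]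
      rfl
    rw [hk2, hACall] at this
    rw [hACall] at hcd
    rw [this] at hcd
    simp at hcd
  rw [if_neg (by simpa [List.isEmpty_iff] using hne2)]
  rw [hk1]
  have hcongr : PySem.List.max? (PySem.List.dedup AC)
      (fun k => (AC.foldl (fun (d : PySem.Dict (List String) Int) subset =>
        d.insert subset (PySem.Str.len (longestCommonPrefixA subset))) PySem.Dict.empty).getD k 0)
      = PySem.List.max? (PySem.List.dedup AC) glen := by
    apply max?_congr
    intro k hk
    rw [getD_foldl_insert_fun, if_pos (mem_dedup'.mp hk)]
    rfl
  rw [hcongr, hACall]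
  cases hmx : PySem.List.max? (PySem.List.dedup (allCombos rhss)) glen with
  | none =>
    rw [hACall] at hcd
    rw [(PySem.List.max?_eq_none_iff _ _).mp hmx] at hcd
    simp at hcd
  | some k =>
    simp only [Option.map_some]
    have hkAC : k ∈ allCombos rhss := mem_dedup'.mp (PySem.List.max?_mem hmx)
    rw [getD_foldl_insert_fun, if_pos (hACall ▸ hkAC)]

-- dedup keeps a first-maximum decomposition
lemma dedup_decomp {α : Type} [BEq α] [LawfulBEq α] (pre suf : List α) (m : α) (hm : m ∉ pre) :
    ∃ pre' suf', PySem.List.dedup (pre ++ m :: suf) = pre' ++ m :: suf'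
      ∧ (∀ x ∈ pre', x ∈ pre) ∧ (∀ x ∈ suf', x ∈ suf) := by
  have h1 : PySem.List.dedup (pre ++ m :: suf)
      = PySem.Set.ofList pre ++ (PySem.Set.ofList (m :: suf)).filter
          (fun y => !(PySem.Set.ofList pre).contains y) := by
    show PySem.Set.ofList (pre ++ m :: suf) = _
    rw [PySem.Set.ofList_append, PySem.Set.update_eq_append_filter]
  have hmc : ((PySem.Set.ofList pre).contains m) = false := by
    rw [← Bool.not_eq_true, PySem.Set.contains_iff]
    rw [PySem.Set.mem_ofList _ _]
    exact hm
  rw [PySem.Set.ofList_cons, List.filter_cons, hmc] at h1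
  simp only [Bool.not_false, if_true] at h1
  refine ⟨PySem.Set.ofList pre,
    ((PySem.Set.ofList suf).discard m).filter (fun y => !(PySem.Set.ofList pre).contains y),
    h1, ?_, ?_⟩
  · intro x hx
    exact (PySem.Set.mem_ofList _ _).mp hx
  · intro x hx
    have := (List.mem_filter.mp hx).1
    have := (PySem.Set.mem_discard _ _ _).mp this
    exact (PySem.Set.mem_ofList _ _).mp this.1

lemma dedup_append_decomp {α : Type} [BEq α] [LawfulBEq α] (l r : List α) :
    ∃ r', PySem.List.dedup (l ++ r) = PySem.List.dedup l ++ r' ∧ ∀ x ∈ r', x ∈ r := by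
  refine ⟨(PySem.Set.ofList r).filter (fun y => !(PySem.Set.ofList l).contains y), ?_, ?_⟩
  · show PySem.Set.ofList (l ++ r) = _
    rw [PySem.Set.ofList_append, PySem.Set.update_eq_append_filter]
    rfl
  · intro x hx
    exact (PySem.Set.mem_ofList _ _).mp (List.mem_filter.mp hx).1

-- ---------- the selection agreement ----------

lemma canonical_decomp (P : List (String × String)) (q : String × String)
    (hq : q ∈ P) (h1 : 1 ≤ pv q) :
    ∃ pre m suf, P = pre ++ m :: suf ∧ (∀ x ∈ pre, pv x < pv m)
      ∧ (∀ x ∈ P, pv x ≤ pv m) ∧ 1 ≤ pv m := by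
  obtain ⟨mx, hmx⟩ : ∃ mx, PySem.List.max? P pv = some mx := by
    cases hm : PySem.List.max? P pv with
    | none =>
      have := (PySem.List.max?_eq_none_iff P pv).mp hm
      subst this; simp at hq
    | some mx => exact ⟨mx, rfl⟩
  have hMax : ∀ y ∈ P, pv y ≤ pv mx := PySem.List.max?_isMax hmx
  have hmxP : mx ∈ P := PySem.List.max?_mem hmx
  obtain ⟨m, hfind⟩ : ∃ m, P.find? (fun x => decide (pv mx ≤ pv x)) = some m := by
    cases hf : P.find? (fun x => decide (pv mx ≤ pv x)) with
    | none =>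
      have := List.find?_eq_none.mp hf mx hmxP
      simp at this
    | some m => exact ⟨m, rfl⟩
  obtain ⟨hpm, pre, suf, hP, hpre⟩ := List.find?_eq_some_iff_append.mp hfind
  have hmP : m ∈ P := by rw [hP]; simp
  have hpvm : pv m = pv mx := le_antisymm (hMax m hmP) (by simpa using hpm)
  refine ⟨pre, m, suf, hP, ?_, ?_, ?_⟩
  · intro x hx
    have := hpre x hx
    simp only [Bool.not_eq_eq_eq_not, Bool.not_true, decide_eq_false_iff_not, not_le] at this
    omega
  · intro x hx
    rw [hpvm]
    exact hMax x hx
  · have := hMax q hq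
    omega

lemma lcpA_eq_empty_of_glen_zero {k : List String} (h : glen k ≤ 0) :
    longestCommonPrefixA k = "" := by
  unfold glen PySem.Str.len at h
  have h0 : (longestCommonPrefixA k).toList.length = 0 := by omega
  have : (longestCommonPrefixA k).toList = [] := List.eq_nil_of_length_eq_zero h0
  apply String.toList_inj.mp
  rw [this]
  rfl

lemma A_select (rhss : List String) (h2 : 2 ≤ rhss.length)
    (pre suf : List (String × String)) (m : String × String)
    (hP : pairsOf rhss = pre ++ m :: suf)
    (hpre : ∀ x ∈ pre, pv x < pv m)
    (hall : ∀ x ∈ pairsOf rhss, pv x ≤ pv m) :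
    getLongestPrefixMatchA rhss = some ([m.1, m.2], longestCommonPrefixA [m.1, m.2]) := by
  rw [gLPM_eq rhss h2]
  suffices hsel : PySem.List.max? (PySem.List.dedup (allCombos rhss)) glen = some [m.1, m.2] by
    rw [hsel]; rfl
  have hwnotin : ([m.1, m.2] : List String) ∉ pre.map (fun p => [p.1, p.2]) := by
    intro hmem
    obtain ⟨a, ha, heq⟩ := List.mem_map.mp hmem
    have : a = m := by
      cases a; cases m
      simp only [List.cons.injEq, and_true] at heq
      simp [heq.1, heq.2]
    subst this
    exact absurd (hpre a ha) (lt_irrefl _)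
  obtain ⟨pre', suf', hdd, hpre', hsuf'⟩ :=
    dedup_decomp (pre.map (fun p => [p.1, p.2])) (suf.map (fun p => [p.1, p.2]))
      [m.1, m.2] hwnotin
  obtain ⟨r', hdr, hr'⟩ := dedup_append_decomp (PySem.List.combinations rhss 2)
    ((PySem.List.pyRange 3 ((rhss.length : Int) + 1) 1).flatMap
      (fun L => PySem.List.combinations rhss L.toNat))
  have hcombos : PySem.List.combinations rhss 2
      = pre.map (fun p => [p.1, p.2]) ++ [m.1, m.2] :: suf.map (fun p => [p.1, p.2]) := by
    rw [combos2_eq, hP]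
    simp
  have hkeys : PySem.List.dedup (allCombos rhss) = pre' ++ [m.1, m.2] :: (suf' ++ r') := by
    rw [allCombos_decomp rhss h2, hdr, hcombos, hdd]
    simp
  rw [hkeys]
  apply max?_of_decomp
  · intro c hc
    obtain ⟨a, ha, rfl⟩ := List.mem_map.mp (hpre' c hc)
    rw [glen_wrap, glen_wrap]
    exact_mod_cast hpre a ha
  · intro c hc
    rcases List.mem_append.mp hc with hc | hc
    · obtain ⟨a, ha, rfl⟩ := List.mem_map.mp (hsuf' c hc)
      rw [glen_wrap, glen_wrap]
      exact_mod_cast hall a (by rw [hP]; simp [ha])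
    · obtain ⟨q, hqP, hq⟩ := rest_bounded rhss (hr' c hc)
      rw [glen_wrap]
      calc glen c ≤ (pv q : Int) := hq
        _ ≤ (pv m : Int) := by exact_mod_cast hall q hqP

lemma match_none (rhss : List String) (h2 : 2 ≤ rhss.length)
    (hb : (bestLoop (0, none) rhss).2 = none) :
    ∃ sub, getLongestPrefixMatchA rhss = some (sub, "") := by
  -- all pairs must have common-prefix length 0
  have hzero : ∀ q ∈ pairsOf rhss, pv q = 0 := by
    by_contra hq
    push Not at hq
    obtain ⟨q, hqP, hq1⟩ := hq
    obtain ⟨pre, m, suf, hP, hpre, hall, hm1⟩ :=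
      canonical_decomp (pairsOf rhss) q hqP (by omega)
    rw [bestLoop_eq_foldl, hP, bfold_decomp pre suf m hpre
      (fun x hx => hall x (by rw [hP]; simp [hx])) hm1] at hb
    simp at hb
  have hboundAll : ∀ S ∈ allCombos rhss, glen S ≤ 0 := by
    intro S hS
    rw [allCombos_decomp rhss h2] at hS
    rcases List.mem_append.mp hS with hS | hS
    · rw [combos2_eq] at hS
      obtain ⟨q, hqP, rfl⟩ := List.mem_map.mp hS
      rw [glen_wrap, hzero q hqP]
      rfl
    · obtain ⟨q, hqP, hq⟩ := rest_bounded rhss hS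
      rw [hzero q hqP] at hq
      exact_mod_cast hq
  obtain ⟨c0, hc0⟩ := mem_allCombos_pair h2
  obtain ⟨hd, tl, hdd⟩ : ∃ hd tl, PySem.List.dedup (allCombos rhss) = hd :: tl := by
    cases hdd : PySem.List.dedup (allCombos rhss) with
    | nil =>
      have := mem_dedup'.mpr hc0
      rw [hdd] at this
      simp at this
    | cons hd tl => exact ⟨hd, tl, rfl⟩
  have hhd : hd ∈ allCombos rhss := mem_dedup'.mp (by rw [hdd]; simp)
  refine ⟨hd, ?_⟩
  rw [gLPM_eq rhss h2, hdd,
    show (hd :: tl) = [] ++ hd :: tl from rfl,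
    max?_of_decomp glen [] tl hd (by simp) ?bound]
  case bound =>
    intro x hx
    have hxA : x ∈ allCombos rhss := mem_dedup'.mp (by rw [hdd]; simp [hx])
    exact le_trans (hboundAll x hxA) (glen_nonneg hd)
  simp only [Option.map_some]
  rw [lcpA_eq_empty_of_glen_zero (hboundAll hd hhd)]

lemma match_some (rhss : List String) (h2 : 2 ≤ rhss.length) {x y : String}
    (hb : (bestLoop (0, none) rhss).2 = some (x, y)) :
    getLongestPrefixMatchA rhss
        = some ([x, y], String.ofList (x.toList.take (bestLoop (0, none) rhss).1))
      ∧ (bestLoop (0, none) rhss).1 = lcpLen x.toList y.toList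
      ∧ 1 ≤ (bestLoop (0, none) rhss).1 := by
  obtain ⟨q, hqP, hq1⟩ : ∃ q ∈ pairsOf rhss, 1 ≤ pv q := by
    by_contra hq
    push Not at hq
    rw [bestLoop_eq_foldl, bfold_noup _ _ (fun p hp => by
      have := hq p hp; omega)] at hb
    simp at hb
  obtain ⟨pre, m, suf, hP, hpre, hall, hm1⟩ :=
    canonical_decomp (pairsOf rhss) q hqP hq1
  have hB : bestLoop (0, none) rhss = (pv m, some m) := by
    rw [bestLoop_eq_foldl, hP]
    exact bfold_decomp pre suf m hpre
      (fun z hz => hall z (by rw [hP]; simp [hz])) hm1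
  have hxy : m = (x, y) := by
    rw [hB] at hb
    simpa using hb
  subst hxy
  have hsel := A_select rhss h2 pre suf (x, y) hP hpre hall
  rw [hB]
  refine ⟨?_, rfl, hm1⟩
  rw [hsel, lcpA_pair]
  rfl

-- ---------- the fresh-name loop ----------

lemma freshTick_length (pred : String → Bool) (n : Nat) (s : String) :
    s.length ≤ (freshTick pred n s).length := by
  induction n generalizing s with
  | zero => simp [freshTick]
  | succ n ih =>
    simp only [freshTick]
    split
    · have := ih (s ++ "'")
      rw [String.length_append] at this
      omega
    · exact le_rfl

lemma freshTick_pred_false (pred : String → Bool) :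
    ∀ (n : Nat) (l : List String) (s : String),
      (∀ t, pred t = true → s.length ≤ t.length → t ∈ l) → l.length < n →
      pred (freshTick pred n s) = false := by
  intro n
  induction n with
  | zero => intro l s _ h; omega
  | succ n ih =>
    intro l s hmem hlen
    simp only [freshTick]
    by_cases hp : pred s = true
    · rw [if_pos hp]
      have hs : s ∈ l := hmem s hp le_rfl
      apply ih (l.erase s)
      · intro t ht hlt
        rw [String.length_append] at hlt
        have hq : ("'" : String).length = 1 := by decide
        have hts : t ≠ s := by
          intro h; subst h; omega
        exact (List.mem_erase_of_ne hts).mpr (hmem t ht (by omega))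

      · have := List.length_erase_of_mem hs
        have := List.length_pos_of_mem hs
        omega
    · simp only [Bool.not_eq_true] at hp
      rw [if_neg (by simp [hp])]
      exact hp

-- ---------- main fold ----------

def stepA (g : List (String × List String)) (out : PySem.Dict String (List String))
    (lhs : String) : PySem.Dict String (List String) :=
  let input : PySem.Dict String (List String) := ⟨g⟩
  let allrhs := input.getD lhs []
  if 1 < allrhs.length then
    match getLongestPrefixMatchA allrhs with
    | some (sub, pre) =>
      if pre ≠ "" then
        let newLhs := freshTick
          (fun s => out.keys.contains s || input.keys.contains s)
          (out.size + input.size + 1) (lhs ++ "'")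
        let pNewRhs := sub.map (fun rhs =>
          String.ofList (PySem.List.slice rhs.toList (some (PySem.Str.len pre)) none))
        let newRhs := allrhs.foldl (fun acc rhs => if rhs ∉ sub then acc ++ [rhs] else acc) []
        (out.insert lhs (newRhs ++ [pre ++ newLhs])).insert newLhs pNewRhs
      else out.insert lhs allrhs
    | none => out.insert lhs allrhs
  else out.insert lhs allrhs

def stepB (g : List (String × List String)) (out : List (String × List String))
    (p : String × List String) : List (String × List String) :=
  let lhs := p.1
  let allrhs := p.2
  let st := bestLoop (0, none) allrhs
  match st.2 with
  | none => out ++ [(lhs, allrhs)]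
  | some (x, y) =>
    let newLhs := freshTick
      (fun s => (out.map Prod.fst).contains s || (g.map Prod.fst).contains s)
      (out.length + g.length + 1) (lhs ++ "'")
    out ++ [(lhs, allrhs.filter (fun r => !(r == x) && !(r == y)) ++
              [String.ofList (PySem.List.slice x.toList none (some (st.1 : Int))) ++ newLhs]),
            (newLhs, [String.ofList (PySem.List.slice x.toList (some (st.1 : Int)) none),
                      String.ofList (PySem.List.slice y.toList (some (st.1 : Int)) none)])]

lemma leftFactoring_eq_foldl (g : List (String × List String)) :
    leftFactoring g = ((g.map Prod.fst).foldl (stepA g) ⟨[]⟩).items := rfl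

lemma leftFactoring_alt_eq_foldl (g : List (String × List String)) :
    leftFactoring_alt g = g.foldl (stepB g) [] := rfl

lemma bestLoop_short (rhss : List String) (h : rhss.length ≤ 1) :
    bestLoop (0, none) rhss = (0, none) := by
  match rhss, h with
  | [], _ => rfl
  | [r], _ => rfl

lemma step_items (g : List (String × List String)) (hg : (g.map Prod.fst).Nodup)
    (out : PySem.Dict String (List String)) (lhs : String) (rhss : List String)
    (hmem : (lhs, rhss) ∈ g) (hfresh : lhs ∉ out.keys) :
    (stepA g out lhs).items = stepB g out.items (lhs, rhss)
    ∧ ∀ k ∈ (stepA g out lhs).keys, k ∈ out.keys ∨ k = lhs ∨ k ∉ g.map Prod.fst := by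
  have hnodupk : ((⟨g⟩ : PySem.Dict String (List String))).keys.Nodup := hg
  have hlook : (⟨g⟩ : PySem.Dict String (List String)).getD lhs [] = rhss :=
    PySem.Dict.getD_of_mem_items _ hmem hnodupk []
  have hclhs : out.contains lhs = false := by
    rw [← Bool.not_eq_true, PySem.Dict.contains_iff_mem_keys]
    exact hfresh
  have hcopyA : (out.insert lhs rhss).items = out.items ++ [(lhs, rhss)] :=
    PySem.Dict.items_insert_of_not_contains out rhss hclhs
  have hkeyscopy : ∀ (v : List String), (out.insert lhs v).keys = out.keys ++ [lhs] :=
    fun v => by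
      show ((out.insert lhs v).items).map _ = _
      rw [PySem.Dict.items_insert_of_not_contains out v hclhs]
      simp [PySem.Dict.keys]
  unfold stepA stepB
  dsimp only
  rw [hlook]
  by_cases h2 : 1 < rhss.length
  · rw [if_pos h2]
    cases hst : (bestLoop (0, none) rhss).2 with
    | none =>
      obtain ⟨sub, hG⟩ := match_none rhss (by omega) hst
      rw [hG]
      dsimp only
      rw [if_neg (by simp)]
      refine ⟨hcopyA, ?_⟩
      intro k hk
      rw [hkeyscopy rhss] at hk
      rcases List.mem_append.mp hk with hk | hk
      · exact Or.inl hk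
      · simp only [List.mem_singleton] at hk
        exact Or.inr (Or.inl hk)
    | some p =>
      obtain ⟨x, y⟩ := p
      obtain ⟨hG, hlen1, hge1⟩ := match_some rhss (by omega) hst
      rw [hG]
      dsimp only
      set BL := bestLoop (0, none) rhss with hBL
      have hxlen : BL.1 ≤ x.toList.length := by
        rw [hlen1]; exact lcpLen_le_left _ _
      have hpretl : (String.ofList (x.toList.take BL.1)).toList = x.toList.take BL.1 :=
        String.toList_ofList
      have hprelen : (String.ofList (x.toList.take BL.1)).toList.length = BL.1 := by
        rw [hpretl, List.length_take]
        exact Nat.min_eq_left hxlen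
      have hprene : (String.ofList (x.toList.take BL.1) : String) ≠ "" := by
        intro hh
        have := congrArg String.toList hh
        rw [hpretl] at this
        have := congrArg List.length this
        simp only [List.length_take] at this
        rw [Nat.min_eq_left hxlen] at this
        simp at this
        omega
      rw [if_pos hprene]
      have hSlen : PySem.Str.len (String.ofList (x.toList.take BL.1)) = (BL.1 : Int) := by
        rw [PySem.Str.len, hprelen]
      -- the fresh-name computations agree definitionally
      have hkeysfst : out.keys = out.items.map Prod.fst := rfl
      set N := freshTick
        (fun s => out.keys.contains s || ((⟨g⟩ : PySem.Dict String (List String))).keys.contains s)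
        (out.size + (⟨g⟩ : PySem.Dict String (List String)).size + 1) (lhs ++ "'") with hN
      have hNalt : freshTick
          (fun s => (out.items.map Prod.fst).contains s || (g.map Prod.fst).contains s)
          (out.items.length + g.length + 1) (lhs ++ "'") = N := rfl
      have hNpred : (out.keys.contains N
          || ((⟨g⟩ : PySem.Dict String (List String))).keys.contains N) = false := by
        rw [hN]
        have hm : ∀ t, ((fun s => out.keys.contains s
              || ((⟨g⟩ : PySem.Dict String (List String))).keys.contains s) t) = true →
            (lhs ++ "'").length ≤ t.length → t ∈ out.keys ++ g.map Prod.fst := by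
          intro t ht _
          rcases Bool.or_eq_true_iff.mp ht with ht | ht
          · exact List.mem_append.mpr (Or.inl (by simpa using ht))
          · exact List.mem_append.mpr (Or.inr (by simpa using ht))
        have hl : (out.keys ++ g.map Prod.fst).length
            < out.size + (⟨g⟩ : PySem.Dict String (List String)).size + 1 := by
          simp only [List.length_append, List.length_map]
          have h5 : out.keys.length = out.items.length := by
            rw [hkeysfst, List.length_map]
          rw [h5]
          show out.items.length + g.length < out.size + (⟨g⟩ : PySem.Dict String (List String)).size + 1
          simp [PySem.Dict.size]
        exact freshTick_pred_false
          (fun s => out.keys.contains s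
            || ((⟨g⟩ : PySem.Dict String (List String))).keys.contains s)
          (out.size + (⟨g⟩ : PySem.Dict String (List String)).size + 1)
          (out.keys ++ g.map Prod.fst) (lhs ++ "'") hm hl
      have hNout : N ∉ out.keys := by
        intro hh
        rcases Bool.or_eq_false_iff.mp hNpred with ⟨h1, _⟩
        rw [← Bool.not_eq_true, List.contains_iff_mem] at h1
        exact h1 hh
      have hNg : N ∉ g.map Prod.fst := by
        intro hh
        rcases Bool.or_eq_false_iff.mp hNpred with ⟨_, h1⟩
        rw [← Bool.not_eq_true, List.contains_iff_mem] at h1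
        exact h1 hh
      have hNlhs : N ≠ lhs := by
        have h1 := freshTick_length
          (fun s => out.keys.contains s || ((⟨g⟩ : PySem.Dict String (List String))).keys.contains s)
          (out.size + (⟨g⟩ : PySem.Dict String (List String)).size + 1) (lhs ++ "'")
        rw [← hN, String.length_append] at h1
        have hq : ("'" : String).length = 1 := by decide
        intro hh
        rw [hh] at h1
        omega
      have hcN : ((out.insert lhs (rhss.foldl
          (fun acc rhs => if rhs ∉ [x, y] then acc ++ [rhs] else acc) []
            ++ [String.ofList (x.toList.take BL.1) ++ N])).contains N) = false := by
        rw [← Bool.not_eq_true, PySem.Dict.contains_iff_mem_keys, hkeyscopy]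
        intro hh
        rcases List.mem_append.mp hh with hh | hh
        · exact hNout hh
        · simp only [List.mem_singleton] at hh
          exact hNlhs hh
      constructor
      · rw [PySem.Dict.items_insert_of_not_contains _ _ hcN,
          PySem.Dict.items_insert_of_not_contains _ _ hclhs]
        rw [PySem.List.foldl_append_ite_eq_filter]
        rw [List.filter_congr (l := rhss)
          (q := fun r => !(r == x) && !(r == y)) (fun r _ => by
            by_cases hrx : r = x
            · subst hrx; simp
            · by_cases hry : r = y
              · subst hry; simp
              · simp [hrx, hry])]
        rw [hSlen]
        have hsl1 : PySem.List.slice x.toList (some (BL.1 : Int)) none = x.toList.drop BL.1 :=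
          PySem.List.slice_from_natCast _ _
        have hsl2 : PySem.List.slice y.toList (some (BL.1 : Int)) none = y.toList.drop BL.1 :=
          PySem.List.slice_from_natCast _ _
        have hsl3 : PySem.List.slice x.toList none (some (BL.1 : Int)) = x.toList.take BL.1 :=
          PySem.List.slice_to_natCast _ _
        rw [hsl3]
        simp only [List.map_cons, List.map_nil, hsl1, hsl2, hNalt]
        simp [List.append_assoc]
      · intro k hk
        rw [PySem.Dict.mem_keys_insert] at hk
        rcases hk with rfl | hk2
        · exact Or.inr (Or.inr hNg)
        · rw [hkeyscopy] at hk2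
          rcases List.mem_append.mp hk2 with hk3 | hk3
          · exact Or.inl hk3
          · simp only [List.mem_singleton] at hk3
            exact Or.inr (Or.inl hk3)
  · rw [if_neg h2]
    rw [bestLoop_short rhss (by omega)]
    refine ⟨hcopyA, ?_⟩
    intro k hk
    rw [hkeyscopy rhss] at hk
    rcases List.mem_append.mp hk with hk | hk
    · exact Or.inl hk
    · simp only [List.mem_singleton] at hk
      exact Or.inr (Or.inl hk)

lemma main_fold (g : List (String × List String)) (hg : (g.map Prod.fst).Nodup) :
    ∀ (rest : List (String × List String)) (out : PySem.Dict String (List String)),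
      rest.Sublist g → (∀ k ∈ out.keys, k ∉ rest.map Prod.fst) →
      ((rest.map Prod.fst).foldl (stepA g) out).items = rest.foldl (stepB g) out.items := by
  intro rest
  induction rest with
  | nil => intro out _ _; rfl
  | cons p rest ih =>
    intro out hsub hinv
    obtain ⟨lhs, rhss⟩ := p
    have hmem : (lhs, rhss) ∈ g := hsub.subset (by simp)
    have hfresh : lhs ∉ out.keys := by
      intro hh
      exact hinv lhs hh (by simp)
    obtain ⟨hitems, hkeys⟩ := step_items g hg out lhs rhss hmem hfresh
    have hnodup : ((lhs, rhss) :: rest).map Prod.fst |>.Nodup := (hsub.map Prod.fst).nodup hg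
    have hlhsrest : lhs ∉ rest.map Prod.fst := by
      simp only [List.map_cons, List.nodup_cons] at hnodup
      exact hnodup.1
    have hrestsub : rest.Sublist g := (List.sublist_cons_self (lhs, rhss) rest).trans hsub
    simp only [List.map_cons, List.foldl_cons]
    rw [← hitems]
    apply ih (stepA g out lhs) hrestsub
    intro k hk
    rcases hkeys k hk with hk' | hk' | hk'
    · intro hh
      exact hinv k hk' (by simp [hh])
    · subst hk'
      exact hlhsrest
    · intro hh
      exact hk' (List.map_subset Prod.fst hrestsub.subset hh)

-- ===== VERDICT (by name: the statement is the Claim_ definition above) =====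
theorem leftFactoring_spec : Claim_equal_leftFactoring := by
  intro g _hdom hpre
  unfold Spec_leftFactoring
  rw [leftFactoring_eq_foldl, leftFactoring_alt_eq_foldl]
  exact main_fold g hpre g ⟨[]⟩ (List.Sublist.refl g) (by simp [PySem.Dict.keys])
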